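-- pv_equiv track=rewrite | github.com/waving7799/IADGuard | Utils/SmaliUtil.py | to_java_class_name
-- ===== SOURCE A (Python) =====
-- FLAG = {'V': 'void',
--         'Z': 'boolean',
--         'B': 'byte',
--         'S': 'short',
--         'C': 'char',
--         'I': 'int',
--         'J': 'long',
--         'F': 'float',
--         'D': 'double'}
--
-- def to_java_class_name(part, is_add=True):
--     ret = '<error>'
--     obj = False
--     array = 0
--     start = 0
--     import_class = []
--     for i in range(len(part)):
--         if not obj:
--             if part[i] == '[':
--                 array = array + 1
--             elif part[i] == 'L':
--                 obj = True
--                 start = i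
--             else:
--                 ret = FLAG[part[i]]
--                 is_add = False
--                 break
--         else:
--             if part[i] == ';':
--                 cls = part[start + 1: i]
--                 cls = cls.replace('/', '.')
--                 ret = cls
--                 break
--     if is_add:
--         import_class.append(ret)
--
--     ret = ret.split('.')[-1]
--
--     while array > 0:
--         ret = (ret + '[]')
--         array = array - 1
--
--     return ret
-- ===== SOURCE B (Python) =====
-- FLAG = {'V': 'void',
--         'Z': 'boolean',
--         'B': 'byte',
--         'S': 'short',
--         'C': 'char',
--         'I': 'int',
--         'J': 'long',
--         'F': 'float',
--         'D': 'double'}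
--
--
-- def to_java_class_name(part, is_add=True):
--     stripped = part.lstrip('[')
--     array = len(part) - len(stripped)
--     if stripped.startswith('L'):
--         body, sep, _tail = stripped[1:].partition(';')
--         ret = body.replace('/', '.') if sep else '<error>'
--     elif stripped:
--         ret = FLAG[stripped[0]]
--     else:
--         ret = '<error>'
--     return ret.split('.')[-1] + '[]' * array
-- ===== Notes on version B (the rewrite author's own statement) =====
-- stated objective: simpler
-- what changed: Replaces A's single index-driven state machine (obj/start/array flags with breaks, plus dead is_add/import_class code) by a direct decomposition: strip the leading '[' prefix, branch once on the next character, and partition at the first ';'.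
-- outside the precondition, e.g. on to_java_class_name('X', True): A raises KeyError, B raises KeyError
import Mathlib
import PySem

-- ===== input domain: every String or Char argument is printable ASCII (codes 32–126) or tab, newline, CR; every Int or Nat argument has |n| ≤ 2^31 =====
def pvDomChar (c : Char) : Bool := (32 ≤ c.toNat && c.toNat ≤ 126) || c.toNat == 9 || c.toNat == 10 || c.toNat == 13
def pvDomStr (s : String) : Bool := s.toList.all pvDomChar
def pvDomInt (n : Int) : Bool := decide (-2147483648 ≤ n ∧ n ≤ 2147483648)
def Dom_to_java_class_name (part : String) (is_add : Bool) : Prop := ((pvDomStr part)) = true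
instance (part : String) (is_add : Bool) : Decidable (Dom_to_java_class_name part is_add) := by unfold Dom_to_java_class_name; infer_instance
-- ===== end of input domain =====

-- B replaces A's index state machine by a direct decomposition (strip '[' prefix, branch on
-- the next character, partition at ';'), dropping the dead is_add/import_class code: simpler.

-- module constant FLAG, shared by both Pythons
def pvFLAG : PySem.Dict Char (List Char) :=
  PySem.Dict.ofList
    [('V', "void".toList), ('Z', "boolean".toList), ('B', "byte".toList),
     ('S', "short".toList), ('C', "char".toList), ('I', "int".toList),
     ('J', "long".toList), ('F', "float".toList), ('D', "double".toList)]

-- ret.split('.')[-1]  (identical expression in both Pythons)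
def pvSplitLast (ret : List Char) : List Char :=
  (PySem.List.pyGet? (PySem.Chars.splitOn ret ['.']) (-1)).getD []

-- ===== PORT A =====
-- the for-loop of A; returns none exactly where Python raises KeyError (FLAG[part[i]])
def pvALoop (full : List Char) (cs : List Char) (i : Nat) (ret : List Char)
    (obj : Bool) (array : Nat) (start : Nat) (is_add : Bool) :
    Option (List Char × Bool × Nat) :=
  match cs with
  | [] => some (ret, is_add, array)
  | c :: rest =>
    if obj = false then
      if c = '[' then pvALoop full rest (i+1) ret obj (array+1) start is_add
      else if c = 'L' then pvALoop full rest (i+1) ret true array i is_add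
      else
        match pvFLAG.get? c with
        | some v => some (v, false, array)
        | none => none
    else
      if c = ';' then
        some (PySem.Chars.replace
                (PySem.List.slice full (some ((start + 1 : Nat) : Int)) (some ((i : Nat) : Int)))
                ['/'] ['.'], is_add, array)
      else pvALoop full rest (i+1) ret obj array start is_add

-- the trailing 'while array > 0: ret = ret + "[]"' loop
def pvABrackets (ret : List Char) : Nat → List Char
  | 0 => ret
  | n + 1 => pvABrackets (ret ++ "[]".toList) n

def to_java_class_name (part : String) (is_add : Bool) : String :=
  match pvALoop part.toList part.toList 0 "<error>".toList false 0 0 is_add with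
  | none => ""   -- Python raises KeyError here; excluded by Pre_
  | some (ret, _is_add', array) =>
      -- 'if is_add: import_class.append(ret)' mutates only the dead local import_class
      String.mk (pvABrackets (pvSplitLast ret) array)

-- ===== PORT B =====
def to_java_class_name_alt (part : String) (is_add : Bool) : String :=
  let stripped := part.toList.dropWhile (· == '[')          -- part.lstrip('['), exact hand port
  let array := part.toList.length - stripped.length
  let retOpt : Option (List Char) :=
    match stripped with
    | 'L' :: tail =>
        -- stripped[1:].partition(';'): body = p.1, sep nonempty iff p.2 ≠ [] (exact hand port)
        let p := tail.span (· != ';')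
        match p.2 with
        | [] => some "<error>".toList
        | _ :: _ => some (PySem.Chars.replace p.1 ['/'] ['.'])
    | [] => some "<error>".toList
    | c :: _ => pvFLAG.get? c                               -- none = Python KeyError
  match retOpt with
  | none => ""
  | some ret =>
      String.mk (pvSplitLast ret ++ (List.replicate array "[]".toList).flatten)

-- ===== PRECONDITION & SPEC =====
-- Pre_ excludes exactly the inputs where Python A (and B alike) raises KeyError:
-- the first non-'[' character exists and is neither 'L' nor a FLAG primitive code.
def Pre_to_java_class_name (part : String) (is_add : Bool) : Prop :=
  ((part.toList.dropWhile (· == '[')).head?.all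
    (fun c => decide (c ∈ (['L','V','Z','B','S','C','I','J','F','D'] : List Char)))) = true

instance (part : String) (is_add : Bool) : Decidable (Pre_to_java_class_name part is_add) := by
  unfold Pre_to_java_class_name; infer_instance

def pvWitness_to_java_class_name : String × Bool := ("[Ljava/lang/String;", true)

def Spec_to_java_class_name (part : String) (is_add : Bool) (out : String) : Prop := out = to_java_class_name_alt part is_add
instance (part : String) (is_add : Bool) (out : String) : Decidable (Spec_to_java_class_name part is_add out) := by unfold Spec_to_java_class_name; infer_instance

-- ===== CLAIM (what is proved, stated in full; the proofs are below) =====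
def Claim_equal_to_java_class_name : Prop := ∀ (part : String) (is_add : Bool), Dom_to_java_class_name part is_add → Pre_to_java_class_name part is_add → Spec_to_java_class_name part is_add (to_java_class_name part is_add)

-- ===== LEMMAS AND PROOFS =====

theorem pv_dropWhile_eq_drop {α : Type} (p : α → Bool) (l : List α) :
    l.dropWhile p = l.drop (l.takeWhile p).length := by
  induction l with
  | nil => rfl
  | cons a t ih =>
    by_cases h : p a = true
    · simp [List.dropWhile_cons, List.takeWhile_cons, h, ih]
    · simp [List.dropWhile_cons, List.takeWhile_cons, h]

theorem pv_take_takeWhile {α : Type} (p : α → Bool) (l : List α) :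
    l.take (l.takeWhile p).length = l.takeWhile p := by
  induction l with
  | nil => rfl
  | cons a t ih =>
    by_cases h : p a = true
    · simp [List.takeWhile_cons, h, ih]
    · simp [List.takeWhile_cons, h]

theorem pvALoop_obj (full : List Char) (cs : List Char) :
    ∀ (i : Nat) (ret : List Char) (a s : Nat) (is_add : Bool), full.drop i = cs →
    pvALoop full cs i ret true a s is_add =
      (match cs.dropWhile (· != ';') with
       | [] => some (ret, is_add, a)
       | _ :: _ =>
         some (PySem.Chars.replace
            (PySem.List.slice full (some ((s + 1 : Nat) : Int))
              (some ((i + (cs.takeWhile (· != ';')).length : Nat) : Int))) ['/'] ['.'],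
            is_add, a)) := by
  induction cs with
  | nil => intro i ret a s is_add _; simp [pvALoop]
  | cons c rest ih =>
    intro i ret a s is_add hdrop
    by_cases hc : c = ';'
    · subst hc
      simp [pvALoop, List.dropWhile_cons]
    · have hrest : full.drop (i + 1) = rest := by
        have := congrArg List.tail hdrop
        simpa [List.tail_drop] using this
      have hne : (c != ';') = true := by simp [hc]
      rw [show pvALoop full (c :: rest) i ret true a s is_add
            = pvALoop full rest (i+1) ret true a s is_add by simp [pvALoop, hc]]
      rw [ih (i+1) ret a s is_add hrest]
      cases h : rest.dropWhile (· != ';') with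
      | nil => simp [List.dropWhile_cons, List.takeWhile_cons, hne, h]
      | cons x xs =>
        simp [List.dropWhile_cons, List.takeWhile_cons, hne, h]
        ring_nf

theorem pvALoop_br (full : List Char) (cs : List Char) :
    ∀ (i : Nat) (ret : List Char) (a s0 : Nat) (is_add : Bool), full.drop i = cs →
    pvALoop full cs i ret false a s0 is_add =
      (let t := (cs.takeWhile (· == '[')).length
       match cs.dropWhile (· == '[') with
       | [] => some (ret, is_add, a + t)
       | c :: tail =>
         if c = 'L' then
           (match tail.dropWhile (· != ';') with
            | [] => some (ret, is_add, a + t)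
            | _ :: _ =>
              some (PySem.Chars.replace
                (PySem.List.slice full (some ((i + t + 1 : Nat) : Int))
                  (some ((i + t + 1 + (tail.takeWhile (· != ';')).length : Nat) : Int))) ['/'] ['.'],
                is_add, a + t))
         else
           match pvFLAG.get? c with
           | some v => some (v, false, a + t)
           | none => none) := by
  induction cs with
  | nil => intro i ret a s0 is_add _; simp [pvALoop]
  | cons c rest ih =>
    intro i ret a s0 is_add hdrop
    have hrest : full.drop (i + 1) = rest := by
      have := congrArg List.tail hdrop
      simpa [List.tail_drop] using this
    by_cases hbr : c = '['
    · subst hbr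
      rw [show pvALoop full ('[' :: rest) i ret false a s0 is_add
            = pvALoop full rest (i+1) ret false (a+1) s0 is_add by simp [pvALoop]]
      rw [ih (i+1) ret (a+1) s0 is_add hrest]
      cases h : rest.dropWhile (· == '[') with
      | nil =>
        simp [List.dropWhile_cons, List.takeWhile_cons, h]
        omega
      | cons x xs =>
        by_cases hx : x = 'L'
        · subst hx
          cases h2 : xs.dropWhile (· != ';') with
          | nil =>
            simp [List.dropWhile_cons, List.takeWhile_cons, h, h2]
            ring_nf
            try exact ⟨trivial, trivial⟩
          | cons y ys =>
            simp [List.dropWhile_cons, List.takeWhile_cons, h, h2]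
            ring_nf
            try exact ⟨trivial, trivial⟩
        · cases hget : pvFLAG.get? x with
          | none => simp [List.dropWhile_cons, List.takeWhile_cons, h, hx, hget]
          | some v =>
            simp [List.dropWhile_cons, List.takeWhile_cons, h, hx, hget]
            omega
    · by_cases hL : c = 'L'
      · subst hL
        rw [show pvALoop full ('L' :: rest) i ret false a s0 is_add
              = pvALoop full rest (i+1) ret true a i is_add by simp [pvALoop]]
        rw [pvALoop_obj full rest (i+1) ret a i is_add hrest]
        simp [List.dropWhile_cons, List.takeWhile_cons]
      · rw [show pvALoop full (c :: rest) i ret false a s0 is_add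
              = (match pvFLAG.get? c with
                 | some v => some (v, false, a)
                 | none => none) by simp [pvALoop, hbr, hL]]
        have hcb : ((c == '[') : Bool) = false := by simp [hbr]
        simp only [List.dropWhile_cons, List.takeWhile_cons, hcb]
        simp [hL]

theorem pvABrackets_eq (n : Nat) : ∀ (s : List Char),
    pvABrackets s n = s ++ (List.replicate n "[]".toList).flatten := by
  induction n with
  | zero => intro s; simp [pvABrackets]
  | succ m ih =>
    intro s
    rw [show pvABrackets s (m+1) = pvABrackets (s ++ "[]".toList) m from rfl, ih]
    simp [List.replicate_succ]

-- ===== VERDICT (by name: the statement is the Claim_ definition above) =====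
theorem to_java_class_name_spec : Claim_equal_to_java_class_name := by
  intro part is_add _hdom _hpre
  unfold Spec_to_java_class_name to_java_class_name to_java_class_name_alt
  rw [pvALoop_br part.toList part.toList 0 "<error>".toList 0 0 is_add (by simp)]
  have hdw : part.toList.dropWhile (· == '[')
      = part.toList.drop (part.toList.takeWhile (· == '[')).length :=
    pv_dropWhile_eq_drop _ _
  have hsum : (part.toList.takeWhile (· == '[')).length
      + (part.toList.dropWhile (· == '[')).length = part.toList.length := by
    have h := congrArg List.length
      (List.takeWhile_append_dropWhile (p := (· == '[')) (l := part.toList))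
    rw [List.length_append] at h
    exact h
  have htl : part.toList.length = part.length := by simp
  set t := (part.toList.takeWhile (· == '[')).length with ht
  cases hstr : part.toList.dropWhile (· == '[') with
  | nil =>
    rw [hstr] at hsum
    simp only [hstr]
    simp [pvABrackets_eq]
    rw [show part.length = t by simp at hsum; omega]
  | cons c tail =>
    rw [hstr] at hsum
    simp only [hstr]
    by_cases hL : c = 'L'
    · subst hL
      simp only [if_pos rfl]
      have htail : part.toList.drop (t + 1) = tail := by
        have hdt : part.toList.drop t = 'L' :: tail := by rw [← hdw, hstr]
        have h2 := congrArg List.tail hdt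
        simpa [List.tail_drop] using h2
      have hspan : (tail.span (· != ';')) = (tail.takeWhile (· != ';'), tail.dropWhile (· != ';')) := by
        simp [List.span_eq_takeWhile_dropWhile]
      rw [hspan]
      cases hdw2 : tail.dropWhile (· != ';') with
      | nil =>
        simp [pvABrackets_eq]
        rw [show part.length - (tail.length + 1) = t by simp at hsum; omega]
      | cons y ys =>
        have hslice : PySem.List.slice part.toList (some ((0 + t + 1 : Nat) : Int))
            (some ((0 + t + 1 + (tail.takeWhile (· != ';')).length : Nat) : Int))
            = tail.takeWhile (· != ';') := by
          have hcast : ((0 + t + 1 + (tail.takeWhile (· != ';')).length : Nat) : Int)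
              = ((t + 1 : Nat) : Int) + (((tail.takeWhile (· != ';')).length : Nat) : Int) := by
            push_cast; ring
          rw [show ((0 + t + 1 : Nat) : Int) = ((t + 1 : Nat) : Int) by norm_num, hcast,
            PySem.List.slice_natCast_add, htail]
          exact pv_take_takeWhile _ _
        rw [hslice]
        simp [pvABrackets_eq]
        rw [show part.length - (tail.length + 1) = t by simp at hsum; omega]
    · simp only [if_neg hL]
      cases pvFLAG.get? c with
      | none => simp
      | some v =>
        simp [pvABrackets_eq]
        rw [show part.length - (tail.length + 1) = t by simp at hsum; omega]
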